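-- pv_equiv track=rewrite | github.com/mtyrolski/INT | int/representation/action_representation_pointer.py | split_expression_on_lexeme
-- ===== SOURCE A (Python) =====
-- def split_expression_on_lexeme(expr, lexeme):
--     subexprs = []
--     expr_beg = 0
--
--     lexeme_beg = expr.find(lexeme, expr_beg)
--     while lexeme_beg != -1:
--         if lexeme_beg > expr_beg:
--             subexprs.append(expr[expr_beg:lexeme_beg])
--
--         lexeme_end = lexeme_beg + len(lexeme)
--         subexprs.append(expr[lexeme_beg:lexeme_end])
--
--         expr_beg = lexeme_end
--         lexeme_beg = expr.find(lexeme, expr_beg)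
--
--     if expr_beg < len(expr):
--         subexprs.append(expr[expr_beg:])
--
--     return subexprs
-- ===== SOURCE B (Python) =====
-- def split_expression_on_lexeme(expr, lexeme):
--     parts = expr.split(lexeme)
--     result = []
--     last = len(parts) - 1
--     for i, part in enumerate(parts):
--         if part:
--             result.append(part)
--         if i != last:
--             result.append(lexeme)
--     return result
-- ===== Notes on version B (the rewrite author's own statement) =====
-- stated objective: simpler
-- what changed: Replaces A's incremental find/index walk with explicit slice bookkeeping by a single expr.split(lexeme) followed by one reconstruction pass that appends each non-empty fragment and the lexeme between fragments.
import Mathlib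
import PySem

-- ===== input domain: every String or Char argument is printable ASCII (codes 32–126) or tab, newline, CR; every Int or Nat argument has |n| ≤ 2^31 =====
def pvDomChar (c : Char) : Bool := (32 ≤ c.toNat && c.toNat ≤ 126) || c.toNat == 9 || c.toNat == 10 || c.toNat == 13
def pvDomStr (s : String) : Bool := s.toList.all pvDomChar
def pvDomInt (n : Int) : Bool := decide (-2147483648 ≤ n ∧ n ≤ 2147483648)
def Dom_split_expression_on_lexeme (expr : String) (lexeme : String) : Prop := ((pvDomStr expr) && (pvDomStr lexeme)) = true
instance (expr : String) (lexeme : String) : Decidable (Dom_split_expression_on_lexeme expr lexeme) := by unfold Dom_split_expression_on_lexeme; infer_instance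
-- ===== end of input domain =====

-- B replaces A's incremental find/slice index walk by split-then-interleave: one str.split,
-- then one pass appending each non-empty fragment and the lexeme between fragments (simpler).

-- ===== PORT A =====
-- A's while loop: fuel = |expr|+1 bounds the iterations (each one advances expr_beg by
-- ≥ |lexeme| ≥ 1 when lexeme ≠ ""); on lexeme = "" Python A loops forever (outside Pre_).
def pvLoopA (cs ls : List Char) : Nat → Int → List (List Char) → List (List Char)
  | 0, _, acc => acc
  | fuel+1, beg, acc =>
    let lb := PySem.Chars.findFrom cs ls beg none
    if lb = -1 then
      if beg < (cs.length : Int) then acc ++ [PySem.List.slice cs (some beg) none] else acc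
    else
      let acc1 := if beg < lb then acc ++ [PySem.List.slice cs (some beg) (some lb)] else acc
      let le := lb + (ls.length : Int)
      pvLoopA cs ls fuel le (acc1 ++ [PySem.List.slice cs (some lb) (some le)])

def split_expression_on_lexeme (expr : String) (lexeme : String) : List String :=
  (pvLoopA expr.toList lexeme.toList (expr.toList.length + 1) 0 []).map String.ofList

-- ===== PORT B =====
-- B's reconstruction pass: append part if non-empty; append lexeme after every part but the last.
def pvBuildB (ls : List Char) : List (List Char) → List (List Char)
  | [] => []
  | [p] => if p ≠ [] then [p] else []
  | p :: q :: rest => (if p ≠ [] then [p] else []) ++ ls :: pvBuildB ls (q :: rest)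

def split_expression_on_lexeme_alt (expr : String) (lexeme : String) : List String :=
  match PySem.Chars.split? expr.toList lexeme.toList with
  | none => []   -- lexeme = "": Python's split raises ValueError (outside Pre_)
  | some parts => (pvBuildB lexeme.toList parts).map String.ofList

-- ===== PRECONDITION & SPEC =====
-- Pre_ excludes only lexeme = "", on which A loops forever (str.find('', i) = i) and B's
-- expr.split('') raises ValueError: neither program returns a value there.
def Pre_split_expression_on_lexeme (_expr : String) (lexeme : String) : Prop := lexeme ≠ ""
instance (expr : String) (lexeme : String) : Decidable (Pre_split_expression_on_lexeme expr lexeme) := by unfold Pre_split_expression_on_lexeme; infer_instance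

def pvWitness_split_expression_on_lexeme : String × String := ("1+2+3", "+")

def Spec_split_expression_on_lexeme (expr : String) (lexeme : String) (out : List String) : Prop := out = split_expression_on_lexeme_alt expr lexeme
instance (expr : String) (lexeme : String) (out : List String) : Decidable (Spec_split_expression_on_lexeme expr lexeme out) := by unfold Spec_split_expression_on_lexeme; infer_instance

-- ===== CLAIM (what is proved, stated in full; the proofs are below) =====
def Claim_equal_split_expression_on_lexeme : Prop := ∀ (expr : String) (lexeme : String), Dom_split_expression_on_lexeme expr lexeme → Pre_split_expression_on_lexeme expr lexeme → Spec_split_expression_on_lexeme expr lexeme (split_expression_on_lexeme expr lexeme)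

-- ===== LEMMAS AND PROOFS =====

-- Reference splitter: splitOn's fuel loop, re-stated as structural recursion on the suffix.
def pvSref (ls : List Char) : List Char → List Char → List (List Char)
  | [], cur => [cur.reverse]
  | c :: rest, cur =>
    if h : ls ≠ [] ∧ ls.isPrefixOf (c :: rest) then
      cur.reverse :: pvSref ls ((c :: rest).drop ls.length) []
    else
      pvSref ls rest (c :: cur)
termination_by l _ => l.length
decreasing_by
  · simp only [List.length_drop, List.length_cons]
    have : 1 ≤ ls.length := List.length_pos_of_ne_nil h.1
    omega
  · simp

lemma pvFind_go_cons (sub : List Char) (c : Char) (t : List Char) (k : Nat) :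
    PySem.Chars.find.go sub (c :: t) k =
      if sub.isPrefixOf (c :: t) then (k : Int) else PySem.Chars.find.go sub t (k+1) := by
  rw [PySem.Chars.find.go]

lemma pvFind_go_nil (sub : List Char) (k : Nat) :
    PySem.Chars.find.go sub [] k = if sub.isEmpty then (k : Int) else -1 := by
  rw [PySem.Chars.find.go]

lemma pvFind_go_shift (sub : List Char) (hs : sub ≠ []) :
    ∀ (l : List Char) (k : Nat), PySem.Chars.find.go sub l k =
      if PySem.Chars.find.go sub l 0 = -1 then -1 else PySem.Chars.find.go sub l 0 + k := by
  intro l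
  induction l with
  | nil => intro k; simp [pvFind_go_nil, List.isEmpty_iff, hs]
  | cons c t ih =>
    intro k
    rw [pvFind_go_cons, pvFind_go_cons]
    by_cases hp : sub.isPrefixOf (c :: t)
    · simp [hp]
    · simp only [hp]
      have hge : -1 ≤ PySem.Chars.find.go sub t 0 := by
        have := PySem.Chars.neg_one_le_find t sub
        simpa [PySem.Chars.find] using this
      rw [ih (k+1), ih 1]
      by_cases h0 : PySem.Chars.find.go sub t 0 = -1
      · simp [h0]
      · rw [if_neg h0, if_neg h0]
        push_cast
        split <;> omega

lemma pvFind_cons (sub : List Char) (hs : sub ≠ []) (c : Char) (t : List Char) :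
    PySem.Chars.find (c :: t) sub =
      if sub.isPrefixOf (c :: t) then 0
      else if PySem.Chars.find t sub = -1 then -1 else PySem.Chars.find t sub + 1 := by
  simp only [PySem.Chars.find]
  rw [pvFind_go_cons, pvFind_go_shift sub hs t 1]
  norm_num

lemma pvFind_nil (sub : List Char) (hs : sub ≠ []) : PySem.Chars.find [] sub = -1 := by
  simp only [PySem.Chars.find]
  simp [pvFind_go_nil, List.isEmpty_iff, hs]

-- splitOn's fuel loop computes pvSref (with the accumulator made explicit).
lemma pvGo_eq_sref (ls : List Char) (hls : ls ≠ []) :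
    ∀ (fuel : Nat) (l cur : List Char) (acc : List (List Char)), l.length ≤ fuel →
      PySem.Chars.splitOn.go ls fuel l cur acc = acc.reverse ++ pvSref ls l cur := by
  intro fuel
  induction fuel with
  | zero =>
    intro l cur acc hl
    have : l = [] := by cases l <;> simp_all
    subst this
    rw [PySem.Chars.splitOn.go, pvSref]
    simp
  | succ n ih =>
    intro l cur acc hl
    cases l with
    | nil =>
      rw [PySem.Chars.splitOn.go, pvSref]
      · simp
      · omega
    | cons c rest =>
      simp only [List.length_cons] at hl
      have h1 : 1 ≤ ls.length := List.length_pos_of_ne_nil hls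
      rw [PySem.Chars.splitOn.go, pvSref]
      by_cases hp : ls.isPrefixOf (c :: rest)
      · rw [if_pos hp, dif_pos ⟨hls, hp⟩]
        rw [ih _ _ _ (by simp only [List.length_drop, List.length_cons]; omega)]
        simp
      · rw [if_neg hp, dif_neg (fun hc => hp hc.2)]
        rw [ih _ _ _ (by omega)]

lemma pvSref_ne_nil (ls l cur : List Char) : pvSref ls l cur ≠ [] := by
  induction l, cur using pvSref.induct ls with
  | case1 cur => rw [pvSref]; simp
  | case2 c rest cur h _ => rw [pvSref, dif_pos h]; simp
  | case3 c rest cur h ih => rw [pvSref, dif_neg h]; exact ih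

lemma pvSref_no_occ (ls : List Char) :
    ∀ (l : List Char), ¬ ls <:+: l → ∀ cur, pvSref ls l cur = [cur.reverse ++ l] := by
  intro l
  induction l with
  | nil => intro _ cur; rw [pvSref]; simp
  | cons c rest ih =>
    intro hno cur
    have hp : ¬ ls.isPrefixOf (c :: rest) := by
      intro h
      exact hno (List.IsPrefix.isInfix (List.isPrefixOf_iff_prefix.mp h))
    rw [pvSref, dif_neg (fun hc => hp hc.2)]
    rw [ih (fun h => hno (List.infix_cons h)) (c :: cur)]
    simp

lemma pvSref_find (ls : List Char) (hls : ls ≠ []) :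
    ∀ (l : List Char) (k : Nat), PySem.Chars.find l ls = (k : Int) → ∀ cur,
      pvSref ls l cur = (cur.reverse ++ l.take k) :: pvSref ls (l.drop (k + ls.length)) [] := by
  intro l
  induction l with
  | nil =>
    intro k hk
    rw [pvFind_nil ls hls] at hk
    exact absurd hk (by omega)
  | cons c rest ih =>
    intro k hk cur
    rw [pvFind_cons ls hls] at hk
    by_cases hp : ls.isPrefixOf (c :: rest)
    · rw [if_pos hp] at hk
      have hk0 : k = 0 := by omega
      subst hk0
      rw [pvSref, dif_pos ⟨hls, hp⟩]
      simp
    · rw [if_neg hp] at hk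
      by_cases h0 : PySem.Chars.find rest ls = -1
      · rw [if_pos h0] at hk
        exact absurd hk (by omega)
      · rw [if_neg h0] at hk
        have hge : 0 ≤ PySem.Chars.find rest ls := by
          have := PySem.Chars.neg_one_le_find rest ls
          omega
        obtain ⟨k', hk'⟩ : ∃ k' : Nat, PySem.Chars.find rest ls = (k' : Int) :=
          ⟨(PySem.Chars.find rest ls).toNat, (Int.toNat_of_nonneg hge).symm⟩
        rw [hk'] at hk
        have hkk : k = k' + 1 := by omega
        subst hkk
        rw [pvSref, dif_neg (fun hc => hp hc.2)]
        rw [ih k' hk' (c :: cur)]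
        have e1 : (c :: cur).reverse ++ List.take k' rest = cur.reverse ++ List.take (k'+1) (c :: rest) := by
          simp [List.take_succ_cons]
        have e2 : List.drop (k' + ls.length) rest = List.drop (k' + 1 + ls.length) (c :: rest) := by
          have h3 : k' + 1 + ls.length = (k' + ls.length) + 1 := by omega
          rw [h3, List.drop_succ_cons]
        rw [e1, e2]

-- The main loop invariant: A's index walk from position beg produces B's interleaving of
-- the split of the remaining suffix.
lemma pvLoopA_eq (cs ls : List Char) (hls : ls ≠ []) :
    ∀ (fuel : Nat) (beg : Int) (acc : List (List Char)),
      0 ≤ beg → beg.toNat ≤ cs.length → cs.length - beg.toNat < fuel →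
      pvLoopA cs ls fuel beg acc =
        acc ++ pvBuildB ls (pvSref ls (cs.drop beg.toNat) []) := by
  intro fuel
  induction fuel with
  | zero => intro beg acc _ _ h; omega
  | succ n ih =>
    intro beg acc hbeg hle hfuel
    have hbegcast : beg = ((beg.toNat : Nat) : Int) := (Int.toNat_of_nonneg hbeg).symm
    rw [pvLoopA]
    simp only []
    rw [hbegcast, PySem.Chars.findFrom_natCast cs ls beg.toNat hle]
    simp only [Int.toNat_natCast]
    set s := cs.drop beg.toNat with hs
    by_cases hfz : PySem.Chars.find s ls = -1
    · -- no further occurrence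
      simp only [hfz, if_true]
      have hno : ¬ ls <:+: s := (PySem.Chars.find_eq_neg_one_iff s ls).mp hfz
      rw [pvSref_no_occ ls s hno []]
      rw [PySem.List.slice_from cs (by positivity : (0:Int) ≤ (beg.toNat : Int))]
      simp only [Int.toNat_natCast]
      by_cases hlt : ((beg.toNat : Nat) : Int) < (cs.length : Int)
      · have hsne : s ≠ [] := by
          rw [hs]; intro hnil
          have := congrArg List.length hnil
          simp at this; omega
        rw [if_pos hlt, pvBuildB]
        simp [hsne]
        exact hs.symm
      · have hsnil : s = [] := by
          rw [hs]
          have : cs.length ≤ beg.toNat := by omega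
          simp [List.drop_eq_nil_iff.mpr this]
        rw [if_neg hlt, hsnil, pvBuildB]
        simp
    · -- occurrence at beg + k
      have hge : 0 ≤ PySem.Chars.find s ls := by
        have := PySem.Chars.neg_one_le_find s ls
        omega
      obtain ⟨k, hk⟩ : ∃ k : Nat, PySem.Chars.find s ls = (k : Int) :=
        ⟨(PySem.Chars.find s ls).toNat, (Int.toNat_of_nonneg hge).symm⟩
      simp only [hfz, if_false]
      rw [hk]
      rw [if_neg (show ¬(((beg.toNat : Nat) : Int) + (k : Int) = -1) by omega)]
      have hpre : ls <+: s.drop k := by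
        have := (PySem.Chars.find_spec (s := s) (sub := ls) hge).1
        rw [hk] at this; simpa using this
      have hlen : k + ls.length ≤ s.length := by
        have h1 := hpre.length_le
        simp only [List.length_drop] at h1
        have : k ≤ s.length := by
          have := PySem.Chars.find_le_length s ls
          rw [hk] at this; exact_mod_cast this
        omega
      have hslen : s.length = cs.length - beg.toNat := by simp [hs]
      have hlsl : 1 ≤ ls.length := List.length_pos_of_ne_nil hls
      -- the three slices
      have hslice1 : PySem.List.slice cs (some ((beg.toNat : Nat) : Int)) (some (((beg.toNat : Nat) : Int) + (k : Int))) = s.take k := by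
        have : ((beg.toNat : Nat) : Int) + (k : Int) = (((beg.toNat + k : Nat) : Nat) : Int) := by push_cast; ring
        rw [this, PySem.List.slice_natCast cs beg.toNat (beg.toNat + k)]
        simp [hs]
      have hslice2 : PySem.List.slice cs (some (((beg.toNat : Nat) : Int) + (k : Int))) (some ((((beg.toNat : Nat) : Int) + (k : Int)) + (ls.length : Int))) = ls := by
        have e1 : ((beg.toNat : Nat) : Int) + (k : Int) = (((beg.toNat + k : Nat) : Nat) : Int) := by push_cast; ring
        have e2 : (((beg.toNat : Nat) : Int) + (k : Int)) + (ls.length : Int) = (((beg.toNat + k + ls.length : Nat) : Nat) : Int) := by push_cast; ring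
        rw [e2, e1, PySem.List.slice_natCast cs (beg.toNat + k) (beg.toNat + k + ls.length)]
        have hdd : List.drop (beg.toNat + k) cs = s.drop k := by simp [hs]
        rw [hdd]
        have h4 : beg.toNat + k + ls.length - (beg.toNat + k) = ls.length := by omega
        rw [h4]
        exact (List.prefix_iff_eq_take.mp hpre).symm
      rw [hslice1, hslice2]
      -- recursive call
      have hrec := ih (((beg.toNat : Nat) : Int) + (k : Int) + (ls.length : Int))
      have hnn : (0:Int) ≤ ((beg.toNat : Nat) : Int) + (k : Int) + (ls.length : Int) := by positivity
      have htn : (((beg.toNat : Nat) : Int) + (k : Int) + (ls.length : Int)).toNat = beg.toNat + k + ls.length := by omega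
      rw [pvSref_find ls hls s k hk []]
      by_cases hkpos : ((beg.toNat : Nat) : Int) < ((beg.toNat : Nat) : Int) + (k : Int)
      · have hk0 : k ≠ 0 := by omega
        rw [if_pos hkpos]
        rw [hrec _ hnn (by rw [htn]; omega) (by omega)]
        rw [htn]
        have hdd : List.drop (beg.toNat + k + ls.length) cs = s.drop (k + ls.length) := by
          simp [hs]; congr 1; omega
        rw [hdd]
        have htk : s.take k ≠ [] := by
          intro hnil
          rcases List.take_eq_nil_iff.mp hnil with h | h
          · exact hk0 h
          · rw [h] at hlen
            simp at hlen
            omega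
        cases hsr : pvSref ls (s.drop (k + ls.length)) [] with
        | nil => exact absurd hsr (pvSref_ne_nil ls _ _)
        | cons q qs =>
          rw [pvBuildB]
          simp [htk]
      · have hk0 : k = 0 := by omega
        subst hk0
        rw [if_neg hkpos]
        rw [hrec _ hnn (by rw [htn]; omega) (by omega)]
        rw [htn]
        have hdd : List.drop (beg.toNat + 0 + ls.length) cs = s.drop (0 + ls.length) := by
          simp [hs]
        rw [hdd]
        cases hsr : pvSref ls (s.drop (0 + ls.length)) [] with
        | nil => exact absurd hsr (pvSref_ne_nil ls _ _)
        | cons q qs =>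
          rw [pvBuildB]
          simp

-- ===== VERDICT (by name: the statement is the Claim_ definition above) =====
theorem split_expression_on_lexeme_spec : Claim_equal_split_expression_on_lexeme := by
  intro expr lexeme _ hpre
  unfold Spec_split_expression_on_lexeme
  unfold split_expression_on_lexeme split_expression_on_lexeme_alt
  have hls : lexeme.toList ≠ [] := by
    intro h
    exact hpre (by
      have := congrArg String.ofList h
      simpa using this)
  rw [PySem.Chars.split?]
  simp only [List.isEmpty_iff, hls, if_false]
  rw [PySem.Chars.splitOn.eq_def]
  rw [pvGo_eq_sref lexeme.toList hls _ _ _ _ (by omega)]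
  rw [pvLoopA_eq expr.toList lexeme.toList hls (expr.toList.length + 1) 0 [] (by omega) (by simp) (by simp)]
  simp
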